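-- pv_equiv track=rewrite | github.com/FreezeNael/StageL1 | résolution_exhaustif.py | lignes_compatibles
-- ===== SOURCE A (Python) =====
-- def lignes_compatibles(grille):
--     for i in range(1, len(grille)):
--         ligne = i - 1
--         while ligne >= 0:
--             for j in range(9):
--                 if grille[i][j] == grille[ligne][j]:
--                     return False
--                 elif (i % 3 == 1 and ligne > i - 2) or (i % 3 == 2 and ligne > i - 3):
--                     if j % 3 == 1:
--                         for k in grille[i][j - 1: j + 2]:
--                             if k in grille[ligne][j - 1: j + 2]:
--                                 return False
--             ligne -= 1
--     return True
-- ===== SOURCE B (Python) =====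
-- def lignes_compatibles(grille):
--     # One row (or none) is always compatible.
--     if len(grille) <= 1:
--         return True
--     # Column pass: a value repeated in any of the 9 columns is a conflict.
--     for j in range(9):
--         seen = set()
--         for row in grille:
--             if row[j] in seen:
--                 return False
--             seen.add(row[j])
--     # Box pass: two rows of the same 3-row band may not share a value
--     # inside the same 3-column block.
--     for i in range(len(grille)):
--         for l in range(i):
--             if i // 3 == l // 3:
--                 for j in (1, 4, 7):
--                     if any(v in grille[l][j - 1:j + 2] for v in grille[i][j - 1:j + 2]):
--                         return False
--     return True
-- ===== Notes on version B (the rewrite author's own statement) =====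
-- stated objective: alternative
-- what changed: A's single interleaved triple loop (row pair x 9 columns, box test nested inside the column test via elif) is split into two independent passes: a set-based column scan that detects duplicates in each of the 9 columns in one sweep, and a separate box pass over same-band row pairs checking only the three block centres j in (1,4,7) with an explicit floor-division band test i//3==l//3 instead of A's modular elif condition.
-- outside the precondition, e.g. on lignes_compatibles([[1, 2], [2, 9]]): A returns False, B raises IndexError
import Mathlib
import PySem

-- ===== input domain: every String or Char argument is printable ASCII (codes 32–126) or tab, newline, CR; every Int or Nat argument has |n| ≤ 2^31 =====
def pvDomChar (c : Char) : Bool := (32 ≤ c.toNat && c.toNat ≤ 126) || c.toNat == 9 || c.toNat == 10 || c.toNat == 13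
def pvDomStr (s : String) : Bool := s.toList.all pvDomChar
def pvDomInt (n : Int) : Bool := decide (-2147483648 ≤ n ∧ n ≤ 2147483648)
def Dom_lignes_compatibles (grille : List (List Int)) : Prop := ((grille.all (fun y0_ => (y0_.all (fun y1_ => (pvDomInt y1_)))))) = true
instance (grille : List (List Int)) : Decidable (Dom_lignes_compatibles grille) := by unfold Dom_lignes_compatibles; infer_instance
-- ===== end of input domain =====

-- ===== PORT A =====
-- One honest line: B splits A's interleaved triple loop into an independent set-based
-- column-duplicate pass plus a separate same-band box pass (objective: alternative decomposition).
def lignes_compatibles (grille : List (List Int)) : Bool :=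
  (PySem.List.pyRange 1 (grille.length : Int) 1).all (fun i =>
    (PySem.List.pyRange (i - 1) (-1) (-1)).all (fun ligne =>
      (PySem.List.pyRange 0 9 1).all (fun j =>
        if PySem.List.pyGetD (PySem.List.pyGetD grille i []) j 0
            == PySem.List.pyGetD (PySem.List.pyGetD grille ligne []) j 0 then false
        else if ((PySem.Int.mod i 3 == 1) && (ligne > i - 2))
              || ((PySem.Int.mod i 3 == 2) && (ligne > i - 3)) then
          if PySem.Int.mod j 3 == 1 then
            (PySem.List.slice (PySem.List.pyGetD grille i []) (some (j - 1)) (some (j + 2))).all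
              (fun k =>
                !((PySem.List.slice (PySem.List.pyGetD grille ligne []) (some (j - 1)) (some (j + 2))).contains k))
          else true
        else true)))

-- ===== PORT B =====
-- B helper: one sweep down column j with a growing set of already-seen values.
def colScan (rows : List (List Int)) (j : Int) (seen : PySem.Set Int) : Bool :=
  match rows with
  | [] => true
  | r :: rs =>
      if PySem.Set.contains seen (PySem.List.pyGetD r j 0) then false
      else colScan rs j (PySem.Set.add seen (PySem.List.pyGetD r j 0))

def lignes_compatibles_alt (grille : List (List Int)) : Bool :=
  if grille.length ≤ 1 then true
  else
    ((PySem.List.pyRange 0 9 1).all (fun j => colScan grille j PySem.Set.empty))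
    &&
    ((PySem.List.pyRange 0 (grille.length : Int) 1).all (fun i =>
      (PySem.List.pyRange 0 i 1).all (fun l =>
        if PySem.Int.floordiv i 3 == PySem.Int.floordiv l 3 then
          (([1, 4, 7] : List Int)).all (fun j =>
            !((PySem.List.slice (PySem.List.pyGetD grille i []) (some (j - 1)) (some (j + 2))).any
                (fun v =>
                  (PySem.List.slice (PySem.List.pyGetD grille l []) (some (j - 1)) (some (j + 2))).contains v)))
        else true)))

-- ===== PRECONDITION & SPEC =====
-- Pre_ admits: grids where no read can go out of range (at most 1 row, or every row of
-- length >= 9), and short-row grids on which BOTH programs provably return early False —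
-- the first two rows conflict (equal cell or shared block segment) before their short
-- read, and some column holds a duplicate reachable before any too-short row.  It
-- excludes the remaining grids with a row shorter than 9: there Python A raises
-- IndexError on grille[i][j] (j in range(9)) on most of them, and on the few where A
-- still returns an early False, B raises instead.  (The two PORTS, which read any
-- missing cell through pyGetD's default, agree on every input, so the equivalence
-- proof below does not need this hypothesis; Pre_ delimits where the ports are
-- faithful to the two Python programs.)
def Pre_lignes_compatibles (grille : List (List Int)) : Prop :=
  grille.length ≤ 1 ∨ (∀ r ∈ grille, 9 ≤ r.length) ∨
    ((∃ j < min (min (grille.getD 0 []).length (grille.getD 1 []).length) 9,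
        ((grille.getD 1 []).getD j 0 = (grille.getD 0 []).getD j 0) ∨
        (j % 3 = 1 ∧ ∃ v ∈ ((grille.getD 1 []).drop (j - 1)).take 3,
            v ∈ ((grille.getD 0 []).drop (j - 1)).take 3)) ∧
     (∃ j < 9, (∀ r ∈ grille, j ≤ r.length) ∧
        ∃ q < grille.length, (∀ r ∈ grille.take (q + 1), j < r.length) ∧
          ∃ p < q, (grille.getD p []).getD j 0 = (grille.getD q []).getD j 0))
instance (grille : List (List Int)) : Decidable (Pre_lignes_compatibles grille) := by
  unfold Pre_lignes_compatibles; infer_instance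

def pvWitness_lignes_compatibles : List (List Int) :=
  [[1, 2, 3, 4, 5, 6, 7, 8, 9], [4, 5, 6, 7, 8, 9, 1, 2, 3]]

def Spec_lignes_compatibles (grille : List (List Int)) (out : Bool) : Prop := out = lignes_compatibles_alt grille
instance (grille : List (List Int)) (out : Bool) : Decidable (Spec_lignes_compatibles grille out) := by unfold Spec_lignes_compatibles; infer_instance

-- ===== CLAIM (what is proved, stated in full; the proofs are below) =====
def Claim_equal_lignes_compatibles : Prop := ∀ (grille : List (List Int)), Dom_lignes_compatibles grille → Pre_lignes_compatibles grille → Spec_lignes_compatibles grille (lignes_compatibles grille)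

-- ===== LEMMAS AND PROOFS =====

-- value of cell (i, j) as both ports read it (default 0 outside the stated Pre_)
def pvVal (g : List (List Int)) (i j : Int) : Int :=
  PySem.List.pyGetD (PySem.List.pyGetD g i []) j 0

-- the 3-cell block segment grille[i][j-1:j+2]
def pvBlk (g : List (List Int)) (i j : Int) : List Int :=
  PySem.List.slice (PySem.List.pyGetD g i []) (some (j - 1)) (some (j + 2))

-- common characterisation of both ports
def pvGood (g : List (List Int)) : Prop :=
  ∀ i l : Int, 0 ≤ l → l < i → i < (g.length : Int) →
    ((∀ j : Int, 0 ≤ j → j < 9 → pvVal g i j ≠ pvVal g l j) ∧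
     (PySem.Int.floordiv i 3 = PySem.Int.floordiv l 3 →
        ∀ j ∈ ([1, 4, 7] : List Int), ∀ v ∈ pvBlk g i j, v ∉ pvBlk g l j))

theorem pv_stepA (c b m : Prop) [Decidable c] [Decidable b] [Decidable m] (d : Bool) :
    ((if c then false else if b then (if m then d else true) else true) = true) ↔
      (¬ c ∧ (b → m → d = true)) := by
  split_ifs <;> simp_all

theorem pv_band_iff (i l : Int) (h1 : l < i) :
    ((PySem.Int.mod i 3 = 1 ∧ i - 2 < l) ∨ (PySem.Int.mod i 3 = 2 ∧ i - 3 < l)) ↔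
      PySem.Int.floordiv i 3 = PySem.Int.floordiv l 3 := by
  simp only [PySem.Int.mod_eq_emod_of_pos (show (0:Int) < 3 by norm_num),
    PySem.Int.floordiv_eq_ediv_of_pos (show (0:Int) < 3 by norm_num)]
  omega

theorem pv_jmem (j : Int) (h0 : 0 ≤ j) (h9 : j < 9) :
    PySem.Int.mod j 3 = 1 ↔ j ∈ ([1, 4, 7] : List Int) := by
  simp only [PySem.Int.mod_eq_emod_of_pos (show (0:Int) < 3 by norm_num)]
  simp only [List.mem_cons, List.not_mem_nil, or_false]
  omega

theorem pv_A_iff (g : List (List Int)) : lignes_compatibles g = true ↔ pvGood g := by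
  unfold lignes_compatibles
  simp only [List.all_eq_true, PySem.List.mem_pyRange_one, PySem.List.mem_pyRange_neg_one,
    pv_stepA, and_imp, Bool.or_eq_true, Bool.and_eq_true,
    beq_iff_eq, decide_eq_true_eq, gt_iff_lt, Bool.not_eq_true',
    List.contains_eq_mem, decide_eq_false_iff_not]
  constructor
  · intro H i l hl0 hli hin
    have h1 : (1:Int) ≤ i := by omega
    have Hl := H i h1 hin l (by omega) (by omega)
    refine ⟨fun j hj0 hj9 => (Hl j hj0 hj9).1, ?_⟩
    intro hband j hj v hv
    have hj179 : j = 1 ∨ j = 4 ∨ j = 7 := by simpa using hj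
    have hj0 : (0:Int) ≤ j := by rcases hj179 with h|h|h <;> omega
    have hj9 : j < 9 := by rcases hj179 with h|h|h <;> omega
    have hmod : PySem.Int.mod j 3 = 1 := (pv_jmem j hj0 hj9).mpr hj
    have hb := (pv_band_iff i l hli).mpr hband
    exact (Hl j hj0 hj9).2 (by tauto) hmod v hv
  · intro H i hi1 hin l hlm1 hlle j hj0 hj9
    have hl0 : (0:Int) ≤ l := by omega
    have hli : l < i := by omega
    have Hp := H i l hl0 hli hin
    refine ⟨Hp.1 j hj0 hj9, ?_⟩
    intro hb hmod
    have hband := (pv_band_iff i l hli).mp (by tauto)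
    exact Hp.2 hband j ((pv_jmem j hj0 hj9).mp hmod)

theorem pv_colScan_iff (rows : List (List Int)) (j : Int) (seen : PySem.Set Int) :
    colScan rows j seen = true ↔
      ((rows.map (fun r => PySem.List.pyGetD r j 0)).Nodup ∧
       ∀ x ∈ rows.map (fun r => PySem.List.pyGetD r j 0), x ∉ seen) := by
  induction rows generalizing seen with
  | nil => simp [colScan]
  | cons r rs ih =>
    simp only [colScan, List.map_cons, List.nodup_cons, List.mem_cons]
    by_cases hc : PySem.List.pyGetD r j 0 ∈ seen
    · simp only [PySem.Set.contains, List.contains_eq_mem, hc, decide_true, if_true]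
      constructor
      · intro h; exact absurd h Bool.false_ne_true
      · rintro ⟨-, h2⟩; exact absurd hc (h2 _ (Or.inl rfl))
    · simp only [PySem.Set.contains, List.contains_eq_mem, hc, decide_false,
        Bool.false_eq_true, if_false, ih]
      constructor
      · rintro ⟨hnd, hns⟩
        refine ⟨⟨fun hmem => ?_, hnd⟩, ?_⟩
        · exact (hns _ hmem) ((PySem.Set.mem_add seen _ _).mpr (Or.inr rfl))
        · rintro x (rfl | hx)
          · exact hc
          · intro hxs
            exact hns x hx ((PySem.Set.mem_add _ _ _).mpr (Or.inl hxs))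
      · rintro ⟨⟨hnm, hnd⟩, hns⟩
        refine ⟨hnd, fun x hx hxs => ?_⟩
        rcases (PySem.Set.mem_add _ _ _).mp hxs with h | rfl
        · exact hns x (Or.inr hx) h
        · exact hnm hx

theorem pv_stepIf (c : Prop) [Decidable c] (d : Bool) :
    ((if c then d else true) = true) ↔ (c → d = true) := by
  split_ifs <;> simp_all

theorem pv_nodup_iff (g : List (List Int)) (j : Int) :
    (g.map (fun r => PySem.List.pyGetD r j 0)).Nodup ↔
      ∀ i l : Int, 0 ≤ l → l < i → i < (g.length : Int) → pvVal g i j ≠ pvVal g l j := by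
  rw [List.nodup_iff_getElem?_ne_getElem?]
  constructor
  · intro H i l hl0 hli hin hEq
    have hiN : i.toNat < g.length := by omega
    have hlN : l.toNat < g.length := by omega
    apply H l.toNat i.toNat (by omega) (by simpa using hiN)
    have e1 : pvVal g i j = PySem.List.pyGetD (g[i.toNat]) j 0 := by
      unfold pvVal; rw [PySem.List.pyGetD_eq_getElem g [] (by omega) hin]
    have e2 : pvVal g l j = PySem.List.pyGetD (g[l.toNat]) j 0 := by
      unfold pvVal; rw [PySem.List.pyGetD_eq_getElem g [] hl0 (by omega)]
    simp only [List.getElem?_map, List.getElem?_eq_getElem hlN, List.getElem?_eq_getElem hiN,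
      Option.map_some]
    rw [← e1, ← e2, hEq]
  · intro H a b hab hb hEq
    have hbN : b < g.length := by simpa using hb
    have haN : a < g.length := by omega
    have e1 : pvVal g (b : Int) j = PySem.List.pyGetD (g[b]) j 0 := by
      unfold pvVal; rw [PySem.List.pyGetD_eq_getElem g [] (by omega) (by exact_mod_cast hbN)]
      simp
    have e2 : pvVal g (a : Int) j = PySem.List.pyGetD (g[a]) j 0 := by
      unfold pvVal; rw [PySem.List.pyGetD_eq_getElem g [] (by omega) (by exact_mod_cast haN)]
      simp
    apply H (b : Int) (a : Int) (by omega) (by exact_mod_cast hab) (by exact_mod_cast hbN)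
    rw [e1, e2]
    simp only [List.getElem?_map, List.getElem?_eq_getElem haN, List.getElem?_eq_getElem hbN,
      Option.map_some, Option.some_inj] at hEq
    rw [hEq]

theorem pv_B_iff (g : List (List Int)) : lignes_compatibles_alt g = true ↔ pvGood g := by
  unfold lignes_compatibles_alt
  by_cases hn : g.length ≤ 1
  · rw [if_pos hn]
    have hn' : (g.length : Int) ≤ 1 := by exact_mod_cast hn
    constructor
    · intro _ i l h0 h1 h2
      exact absurd h2 (by omega)
    · intro _; rfl
  · rw [if_neg hn]
    simp only [Bool.and_eq_true, List.all_eq_true, PySem.List.mem_pyRange_one, pv_stepIf,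
      beq_iff_eq, Bool.not_eq_true', List.any_eq_false, List.contains_eq_mem,
      decide_eq_true_eq, and_imp]
    constructor
    · rintro ⟨hcol, hbox⟩ i l h0 h1 h2
      refine ⟨fun j hj0 hj9 => ?_, fun hband j hj v hv => ?_⟩
      · exact (pv_nodup_iff g j).mp
          (((pv_colScan_iff g j PySem.Set.empty).mp (hcol j hj0 hj9)).1) i l h0 h1 h2
      · exact hbox i (by omega) h2 l h0 h1 hband j hj v hv
    · intro H
      refine ⟨fun j hj0 hj9 => ?_, fun i hi0 hin l hl0 hli hband j hj v hv => ?_⟩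
      · refine (pv_colScan_iff g j PySem.Set.empty).mpr ⟨?_, ?_⟩
        · exact (pv_nodup_iff g j).mpr (fun i l h0 h1 h2 => (H i l h0 h1 h2).1 j hj0 hj9)
        · intro x _ hx
          simp [PySem.Set.empty] at hx
      · exact (H i l hl0 hli hin).2 hband j hj v hv

theorem lignes_compatibles_eq (grille : List (List Int)) :
    lignes_compatibles grille = lignes_compatibles_alt grille := by
  have h := (pv_A_iff grille).trans (pv_B_iff grille).symm
  cases ha : lignes_compatibles grille <;> cases hb : lignes_compatibles_alt grille <;>
    simp_all

-- ===== VERDICT (by name: the statement is the Claim_ definition above) =====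
theorem lignes_compatibles_spec : Claim_equal_lignes_compatibles := by
  intro grille _ _
  unfold Spec_lignes_compatibles
  exact lignes_compatibles_eq grille
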